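-- pv_equiv track=rewrite | github.com/Merck/PepSeA | alignment/ApiUtils.py | extract_monomer
-- ===== SOURCE A (Python) =====
-- def extract_monomer(aligned_sequence):
--     """
--     Generator function. Yields the monomers of the aligned sequence. Every symbol is accounted for monomer,
--     unless they are not in square brackets. Otherwise, symbols in square brackets are precessed as single monomer.
--
--     Currently works with sequences, where monomers are not separated with dots, e.g.
--         [ClAc]FRYLY[Ahp]FCGKK[NH2]
--
--     If monomers will be separated with dots, it will be necessary to update this function.
--     :param aligned_sequence:
--     :return:
--     """
--     non_natural = False
--     monomer = ''
--
--     # These variables track the number of opened and and closed square brackets.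
--     # This is needed for correct parsing of sequences, which have SMILES as monomers
--     opened = 0
--     closed = 0
--
--     for el in aligned_sequence:
--         if monomer != "" and not non_natural:
--             monomer = ""
--
--         if el == "[" and opened == 0:
--             non_natural = True
--             opened += 1
--         elif el == "[":
--             opened += 1
--             monomer += el
--         elif not non_natural:
--             yield el
--
--         # Yield the monomer, only if the current symbol is closing bracket,
--         # and number of opened brackets is exactly one more than the number of closed ones
--         elif el == "]" and opened == closed + 1:
--             non_natural = False
--             opened = 0
--             closed = 0
--             yield monomer
--         elif el == "]":
--             monomer += el
--             closed += 1
--         else: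
--             monomer += el
--
--     assert not non_natural, f"Non-valid notation of non-natural amino acids in the following sequence {aligned_sequence}"
-- ===== SOURCE B (Python) =====
-- def extract_monomer(aligned_sequence):
--     """Index tokenizer: yield plain characters; on '[' run an inner depth-counting
--     scan that collects the whole bracketed monomer at once."""
--     i, n = 0, len(aligned_sequence)
--     while i < n:
--         ch = aligned_sequence[i]
--         if ch == '[':
--             depth, j, parts = 1, i + 1, []
--             while j < n and depth:
--                 c = aligned_sequence[j]
--                 if c == '[':
--                     depth += 1
--                     parts.append(c)
--                 elif c == ']':
--                     depth -= 1
--                     if depth: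
--                         parts.append(c)
--                 else:
--                     parts.append(c)
--                 j += 1
--             assert depth == 0, f"Non-valid notation of non-natural amino acids in the following sequence {aligned_sequence}"
--             yield ''.join(parts)
--             i = j
--         else:
--             yield ch
--             i += 1
-- ===== Notes on version B (the rewrite author's own statement) =====
-- stated objective: alternative
-- what changed: A's single-pass five-variable state machine (non_natural/monomer/opened/closed carried across every character) is replaced by an index tokenizer: an outer loop yields plain characters and, on '[', an inner depth-counting scan collects the whole bracketed monomer in one go and jumps the index past it.
import Mathlib
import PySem

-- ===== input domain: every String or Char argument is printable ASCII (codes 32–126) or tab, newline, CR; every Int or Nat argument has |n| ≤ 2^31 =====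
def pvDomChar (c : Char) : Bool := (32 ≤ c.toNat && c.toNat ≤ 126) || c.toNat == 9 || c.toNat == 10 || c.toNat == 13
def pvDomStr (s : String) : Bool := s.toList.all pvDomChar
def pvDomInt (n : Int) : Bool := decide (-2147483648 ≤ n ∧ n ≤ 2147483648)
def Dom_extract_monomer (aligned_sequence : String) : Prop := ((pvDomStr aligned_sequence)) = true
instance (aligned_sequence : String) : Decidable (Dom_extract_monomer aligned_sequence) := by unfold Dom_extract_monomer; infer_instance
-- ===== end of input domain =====

-- B replaces A's five-variable single-pass state machine by an index tokenizer with an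
-- inner bracket scan (objective: alternative decomposition, same O(n) cost).

-- ===== PORT A =====
-- A's for-loop over the characters, carried state (non_natural, monomer, opened, closed);
-- the list of yields is the return value.  (The final 'assert not non_natural' raises on
-- unclosed brackets; those inputs are excluded by Pre_ below.)
def extractLoopA : List Char → Bool → List Char → Nat → Nat → List String
  | [], _, _, _, _ => []
  | el :: rest, nn, monomer0, opened, closed =>
    -- "if monomer != '' and not non_natural: monomer = ''"
    let monomer := if monomer0 ≠ [] ∧ nn = false then [] else monomer0
    if el = '[' ∧ opened = 0 then
      extractLoopA rest true monomer (opened + 1) closed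
    else if el = '[' then
      extractLoopA rest nn (monomer ++ [el]) (opened + 1) closed
    else if nn = false then
      String.ofList [el] :: extractLoopA rest nn monomer opened closed
    else if el = ']' ∧ opened = closed + 1 then
      String.ofList monomer :: extractLoopA rest false monomer 0 0
    else if el = ']' then
      extractLoopA rest nn (monomer ++ [el]) opened (closed + 1)
    else
      extractLoopA rest nn (monomer ++ [el]) opened closed

def extract_monomer (aligned_sequence : String) : List String :=
  extractLoopA aligned_sequence.toList false [] 0 0

-- ===== PORT B =====
-- Source B's outer index loop / inner depth-counting bracket scan, as mutual structural
-- recursion on the remaining characters.  (Python's inner 'while' ending with depth ≠ 0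
-- asserts; those inputs are outside Pre_ below, the port returns the yields so far.)
mutual
def tokOuter : List Char → List String
  | [] => []
  | c :: cs => if c = '[' then tokInner cs 1 [] else String.ofList [c] :: tokOuter cs

def tokInner : List Char → Nat → List Char → List String
  | [], _, _ => []
  | c :: cs, depth, parts =>
    if c = '[' then tokInner cs (depth + 1) (parts ++ [c])
    else if c = ']' then
      if depth = 1 then String.ofList parts :: tokOuter cs
      else tokInner cs (depth - 1) (parts ++ [c])
    else tokInner cs depth (parts ++ [c])
end

def extract_monomer_alt (aligned_sequence : String) : List String :=
  tokOuter aligned_sequence.toList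

-- ===== PRECONDITION & SPEC =====
-- Pre_ excludes exactly the strings with an unclosed '[' (final bracket depth ≠ 0,
-- where a stray ']' at depth 0 is ignored): there both Pythons raise AssertionError.
def Pre_extract_monomer (aligned_sequence : String) : Prop :=
  aligned_sequence.toList.foldl
    (fun (d : Nat) ch => if ch = '[' then d + 1 else if ch = ']' then d - 1 else d) 0 = 0
instance (aligned_sequence : String) : Decidable (Pre_extract_monomer aligned_sequence) := by
  unfold Pre_extract_monomer; infer_instance
def pvWitness_extract_monomer : String := "[ClAc]FRY[Ah[p]x]K"

def Spec_extract_monomer (aligned_sequence : String) (out : List String) : Prop := out = extract_monomer_alt aligned_sequence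
instance (aligned_sequence : String) (out : List String) : Decidable (Spec_extract_monomer aligned_sequence out) := by unfold Spec_extract_monomer; infer_instance

-- ===== CLAIM (what is proved, stated in full; the proofs are below) =====
def Claim_equal_extract_monomer : Prop := ∀ (aligned_sequence : String), Dom_extract_monomer aligned_sequence → Pre_extract_monomer aligned_sequence → Spec_extract_monomer aligned_sequence (extract_monomer aligned_sequence)

-- ===== LEMMAS AND PROOFS =====

-- The two ports agree from corresponding states: A in natural state (opened = closed = 0,
-- any monomer, which is reset on the next character) equals tokOuter; A in non-natural
-- state with counters closed < opened equals tokInner at depth = opened - closed.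
theorem extractLoop_agree (cs : List Char) :
    (∀ m, extractLoopA cs false m 0 0 = tokOuter cs) ∧
    (∀ parts opened closed, closed < opened →
      extractLoopA cs true parts opened closed = tokInner cs (opened - closed) parts) := by
  induction cs with
  | nil => exact ⟨fun _ => rfl, fun _ _ _ _ => rfl⟩
  | cons el rest ih =>
    refine ⟨fun m => ?_, fun parts opened closed hlt => ?_⟩
    · -- natural state: the reset leaves monomer = [] either way
      by_cases h : el = '['
      · rcases eq_or_ne m [] with hm | hm
        · simp only [extractLoopA, tokOuter]
          simp [h, hm]
          exact ih.2 [] 1 0 (by omega)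
        · simp only [extractLoopA, tokOuter]
          simp [h, hm]
          exact ih.2 [] 1 0 (by omega)
      · simp only [extractLoopA, tokOuter]
        simp [h]
        exact ih.1 _
    · by_cases h : el = '['
      · subst h
        have hne : opened ≠ 0 := by omega
        simp only [extractLoopA, tokInner]
        simp [hne]
        have := ih.2 (parts ++ ['[']) (opened + 1) closed (by omega)
        rw [this]
        congr 1
        omega
      · by_cases hc : el = ']'
        · subst hc
          by_cases hd : opened = closed + 1
          · have hd1 : opened - closed = 1 := by omega
            simp only [extractLoopA, tokInner]
            simp [h, hd, hd1]
            exact ih.1 _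
          · have hd1 : opened - closed ≠ 1 := by omega
            simp only [extractLoopA, tokInner]
            simp [h, hd]
            have := ih.2 (parts ++ [']']) opened (closed + 1) (by omega)
            rw [this, if_neg hd1, Nat.sub_sub]
        · simp only [extractLoopA, tokInner]
          simp [h, hc]
          exact ih.2 (parts ++ [el]) opened closed hlt

-- ===== VERDICT (by name: the statement is the Claim_ definition above) =====
theorem extract_monomer_spec : Claim_equal_extract_monomer := by
  intro s _ _
  unfold Spec_extract_monomer extract_monomer extract_monomer_alt
  exact (extractLoop_agree s.toList).1 []
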